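-- pv_equiv track=rewrite | github.com/bloomfieldfong/Generador-de-Analizadores | automata.py | movin
-- ===== SOURCE A (Python) =====
-- def posibles_movimientos(nodo,cadena, automata):
--     movimientos = []
--     for n in automata:
--         if n[0] == nodo and n[1] == str(cadena):
--             movimientos.append(n)
--     return movimientos
--
-- def movin(nodos, cadena, lenguaje):
--     if isinstance(nodos, list):
--         nodos = list(nodos)
--     else:
--         nodos = [nodos]
--
--     movimiento = []
--     if isinstance(nodos, list):
--         for n in range(len(nodos)):
--
--             move = posibles_movimientos(nodos[n], cadena, lenguaje)
--
--             for x in move: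
--                 if x[2] not in movimiento:
--                     movimiento.append(x[2])
--         s = set()
--         for item in movimiento:
--             s.add(item)
--         return s
--
--     else:
--         move = posibles_movimientos(nodos, cadena, lenguaje)
--         for x in move:
--             if x[2] not in movimiento:
--                 movimiento.append(x[2])
--
--
--         s = set()
--         for item in movimiento:
--             s.add(item)
--         return s
-- ===== SOURCE B (Python) =====
-- def movin(nodos, cadena, lenguaje):
--     if not isinstance(nodos, list):
--         nodos = [nodos]
--     key = str(cadena)
--     # one pass over the automaton: index source -> list of targets on this symbol
--     index = {}
--     for t in lenguaje:
--         if t[1] == key: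
--             index.setdefault(t[0], []).append(t[2])
--     s = set()
--     for node in nodos:
--         s.update(index.get(node, []))
--     return s
-- ===== Notes on version B (the rewrite author's own statement) =====
-- stated objective: faster
-- what changed: Instead of rescanning the whole automaton once per node (helper posibles_movimientos) with a list-membership dedup pass plus a final set conversion, B makes one pass over the automaton to build a dict index source->targets for the symbol, then takes one dict lookup per node and accumulates targets directly into the result set.
import Mathlib
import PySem

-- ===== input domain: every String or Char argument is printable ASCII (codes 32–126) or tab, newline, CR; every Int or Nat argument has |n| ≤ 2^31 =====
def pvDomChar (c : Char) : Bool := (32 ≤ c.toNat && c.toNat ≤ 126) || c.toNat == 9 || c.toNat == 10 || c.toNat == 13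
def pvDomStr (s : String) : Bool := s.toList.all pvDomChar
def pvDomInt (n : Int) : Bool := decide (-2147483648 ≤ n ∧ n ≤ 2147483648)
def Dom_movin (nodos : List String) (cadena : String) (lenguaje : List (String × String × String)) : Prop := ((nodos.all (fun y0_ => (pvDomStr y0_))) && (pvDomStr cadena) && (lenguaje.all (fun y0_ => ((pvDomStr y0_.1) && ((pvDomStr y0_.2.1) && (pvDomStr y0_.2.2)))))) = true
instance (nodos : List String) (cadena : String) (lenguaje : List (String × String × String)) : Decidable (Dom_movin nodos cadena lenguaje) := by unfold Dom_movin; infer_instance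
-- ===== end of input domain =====

-- B replaces A's per-node rescans of the automaton by a single indexing pass
-- (dict source → targets on the symbol), then one lookup per node (objective: alternative / simpler).

-- ===== PORT A =====
def posibles_movimientos (nodo : String) (cadena : String) (automata : List (String × String × String)) : List (String × String × String) :=
  automata.foldl (fun movimientos n =>
    if n.1 = nodo ∧ n.2.1 = cadena then movimientos ++ [n] else movimientos) []

def movin (nodos : List String) (cadena : String) (lenguaje : List (String × String × String)) : List String :=
  -- nodos is a list here, so 'nodos = list(nodos)' copies it and the first branch runs
  let movimiento : List String :=
    (PySem.List.pyRange 0 nodos.length 1).foldl (fun movimiento n =>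
      let move := posibles_movimientos (PySem.List.pyGetD nodos n "") cadena lenguaje
      move.foldl (fun movimiento x =>
        if ¬ (x.2.2 ∈ movimiento) then movimiento ++ [x.2.2] else movimiento) movimiento) []
  movimiento.foldl (fun s item => PySem.Set.add s item) PySem.Set.empty

-- ===== PORT B =====
def movin_alt (nodos : List String) (cadena : String) (lenguaje : List (String × String × String)) : List String :=
  let key := cadena
  let index : PySem.Dict String (List String) :=
    lenguaje.foldl (fun index t =>
      if t.2.1 = key then index.modify t.1 [] (· ++ [t.2.2]) else index) PySem.Dict.empty
  nodos.foldl (fun s node => PySem.Set.update s (index.getD node [])) PySem.Set.empty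

-- ===== PRECONDITION & SPEC =====
def Spec_movin (nodos : List String) (cadena : String) (lenguaje : List (String × String × String)) (out : List String) : Prop := out = movin_alt nodos cadena lenguaje
instance (nodos : List String) (cadena : String) (lenguaje : List (String × String × String)) (out : List String) : Decidable (Spec_movin nodos cadena lenguaje out) := by unfold Spec_movin; infer_instance

-- ===== CLAIM (what is proved, stated in full; the proofs are below) =====
def Claim_equal_movin : Prop := ∀ (nodos : List String) (cadena : String) (lenguaje : List (String × String × String)), Dom_movin nodos cadena lenguaje → Spec_movin nodos cadena lenguaje (movin nodos cadena lenguaje)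

-- ===== LEMMAS AND PROOFS =====

-- A's helper collects exactly the matching transitions
theorem posibles_eq_filter (nodo cadena : String) (automata : List (String × String × String)) :
    posibles_movimientos nodo cadena automata
      = automata.filter (fun n => n.1 = nodo ∧ n.2.1 = cadena) := by
  unfold posibles_movimientos
  rw [PySem.List.foldl_append_ite_eq_filter]
  simp

-- B's index looked up at a node yields the targets of A's helper, in the same order
theorem index_getD_eq (cadena node : String) (lenguaje : List (String × String × String)) :
    (lenguaje.foldl (fun index t =>
        if t.2.1 = cadena then index.modify t.1 [] (· ++ [t.2.2]) else index)
        (PySem.Dict.empty : PySem.Dict String (List String))).getD node []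
      = (posibles_movimientos node cadena lenguaje).map (·.2.2) := by
  rw [posibles_eq_filter]
  have h1 : (lenguaje.foldl (fun index t =>
        if t.2.1 = cadena then index.modify t.1 [] (· ++ [t.2.2]) else index)
        (PySem.Dict.empty : PySem.Dict String (List String)))
      = (lenguaje.filter (fun t => t.2.1 = cadena)).foldl
          (fun index t => index.modify t.1 [] (· ++ [t.2.2])) PySem.Dict.empty := by
    rw [List.foldl_filter]
    apply PySem.List.foldl_congr_mem
    intro acc x _; simp
  rw [h1]
  have h2 : ((lenguaje.filter (fun t => t.2.1 = cadena)).foldl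
        (fun index t => index.modify t.1 [] (· ++ [t.2.2])) PySem.Dict.empty)
      = (((lenguaje.filter (fun t => t.2.1 = cadena)).map (fun t => (t.1, t.2.2))).foldl
          (fun index p => index.modify p.1 [] (· ++ [p.2])) PySem.Dict.empty) := by
    rw [List.foldl_map]
  rw [h2, PySem.Dict.getD_foldl_modify_append]
  simp [PySem.Dict.getD_empty, List.filter_filter, List.filter_map, List.map_map,
    Function.comp_def]
  rw [show (fun (a : String × String × String) => a.1 == node && decide (a.2.1 = cadena))
        = (fun (n_ : String × String × String) => decide (n_.1 = node) && decide (n_.2.1 = cadena)) from by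
      funext x; rfl]

-- A's dedup-append inner loop is Set.update with the mapped targets
theorem inner_loop_eq_update (m : List String) (move : List (String × String × String)) :
    move.foldl (fun movimiento x =>
        if ¬ (x.2.2 ∈ movimiento) then movimiento ++ [x.2.2] else movimiento) m
      = PySem.Set.update m (move.map (·.2.2)) := by
  rw [PySem.Set.update_map_eq_foldl_add]
  apply PySem.List.foldl_congr_mem
  intro s x _
  rw [PySem.Set.add_eq_ite]
  by_cases h : x.2.2 ∈ s <;> simp [h]

-- the outer accumulator stays duplicate-free
theorem movimiento_nodup (nodos : List String) (f : String → List String) (m : List String)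
    (hm : m.Nodup) :
    (nodos.foldl (fun s node => PySem.Set.update s (f node)) m).Nodup := by
  induction nodos generalizing m with
  | nil => exact hm
  | cons n ns ih => exact ih _ (PySem.Set.nodup_update _ _ hm)

-- folding Set.add over a duplicate-free list returns it unchanged
theorem foldl_add_of_nodup (l : List String) (hl : l.Nodup) :
    l.foldl (fun s item => PySem.Set.add s item) PySem.Set.empty = l := by
  have : l.foldl (fun s item => PySem.Set.add s item) PySem.Set.empty = PySem.Set.ofList l :=
    (PySem.Set.ofList_eq_foldl l).symm
  rw [this]; exact PySem.Set.ofList_eq_self_of_nodup l hl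

-- ===== VERDICT (by name: the statement is the Claim_ definition above) =====
theorem movin_spec : Claim_equal_movin := by
  intro nodos cadena lenguaje _
  unfold Spec_movin movin movin_alt
  have hrange : ∀ (init : List String),
      (PySem.List.pyRange 0 nodos.length 1).foldl (fun movimiento n =>
        (posibles_movimientos (PySem.List.pyGetD nodos n "") cadena lenguaje).foldl
          (fun movimiento x =>
            if ¬ (x.2.2 ∈ movimiento) then movimiento ++ [x.2.2] else movimiento) movimiento) init
      = nodos.foldl (fun movimiento node =>
          (posibles_movimientos node cadena lenguaje).foldl
            (fun movimiento x =>
              if ¬ (x.2.2 ∈ movimiento) then movimiento ++ [x.2.2] else movimiento) movimiento) init := by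
    intro init
    have := PySem.List.foldl_pyRange_pyGetD (a := (0:Int)) (xs := nodos) (d := "")
      (f := fun movimiento node =>
        (posibles_movimientos node cadena lenguaje).foldl
          (fun movimiento x =>
            if ¬ (x.2.2 ∈ movimiento) then movimiento ++ [x.2.2] else movimiento) movimiento)
      (init := init) (by norm_num)
    simpa using this
  simp only [hrange]
  have hbody : ∀ (init : List String),
      nodos.foldl (fun movimiento node =>
          (posibles_movimientos node cadena lenguaje).foldl
            (fun movimiento x =>
              if ¬ (x.2.2 ∈ movimiento) then movimiento ++ [x.2.2] else movimiento) movimiento) init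
      = nodos.foldl (fun s node =>
          PySem.Set.update s ((posibles_movimientos node cadena lenguaje).map (·.2.2))) init := by
    intro init
    apply PySem.List.foldl_congr_mem
    intro s node _
    exact inner_loop_eq_update s _
  rw [hbody]
  rw [foldl_add_of_nodup _ (movimiento_nodup nodos _ _ List.nodup_nil)]
  apply PySem.List.foldl_congr_mem
  intro s node _
  rw [index_getD_eq]
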